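-- pv_equiv track=rewrite | github.com/WilliamBenEmbarek/RSA-AES-34220 | IDEA.py | keyd
-- ===== SOURCE A (Python) =====
-- def keyd(kenya):
-- 	shift = 0
-- 	out=[None]*8
-- 	kenya = bin(kenya)[2:]
-- 	t = kenya
-- 	for i in range(8):
-- 		for j in range(0,i*25):
-- 			t  = t[1:128]+t[0]
-- 		out[i] = t
-- 		shift = shift+1
-- 		t = kenya
-- 	out = ''.join(out)
-- 	out = [out[i:i+16] for i in range(0,len(out),16)]
-- 	out = [int(a,2) for a in out]
-- 	return out
-- ===== SOURCE B (Python) =====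
-- def keyd(kenya):
--     kenya = bin(kenya)[2:]
--     base = kenya[:128]
--     m = len(base)
--     parts = [kenya]
--     for i in range(1, 8):
--         k = (25 * i) % m
--         parts.append(base[k:] + base[:k])
--     bits = ''.join(parts)
--     chunks = [bits[i:i + 16] for i in range(0, len(bits), 16)]
--     return [int(c, 2) for c in chunks]
-- ===== Notes on version B (the rewrite author's own statement) =====
-- stated objective: alternative
-- what changed: B replaces the per-character inner rotation loop (up to 175 single-step rotations per subkey, re-run for each of the 8 subkeys) by computing each subkey directly as one modular slice rotation base[k:]+base[:k] with k=(25*i)%len(base).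
import Mathlib
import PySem

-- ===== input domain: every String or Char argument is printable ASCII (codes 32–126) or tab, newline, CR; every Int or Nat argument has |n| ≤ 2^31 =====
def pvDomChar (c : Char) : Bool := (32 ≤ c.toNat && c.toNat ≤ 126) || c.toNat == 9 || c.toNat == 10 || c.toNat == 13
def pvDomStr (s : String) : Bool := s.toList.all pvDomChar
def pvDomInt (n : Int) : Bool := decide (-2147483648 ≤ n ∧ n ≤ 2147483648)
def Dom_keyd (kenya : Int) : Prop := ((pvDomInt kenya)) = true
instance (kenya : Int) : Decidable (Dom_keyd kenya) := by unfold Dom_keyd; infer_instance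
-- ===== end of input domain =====

-- B derives each subkey by ONE modular slice rotation instead of A's per-character rotation loop;
-- equivalence of the RETURN value is proved for kenya ≥ 0 (negative kenya makes both raise ValueError).

-- shared helper: the final two lines of A and B are the same Python
-- ([out[i:i+16] for i in range(0,len(out),16)] then [int(a,2) for a in out]).
-- int(a,2) is ported with PySem.Int.ofCharsBase?; its 'none' (ValueError) case is excluded by Pre_keyd,
-- so .getD 0 is never taken on admitted inputs.
def pvChunks (out : List Char) : List Int :=
  ((PySem.List.pyRange 0 (PySem.List.len out) 16).map
      (fun i => PySem.List.slice out (some i) (some (i + 16)))).map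
    (fun a => (PySem.Int.ofCharsBase? a 2).getD 0)

-- ===== PORT A =====
-- one inner-loop step:  t = t[1:128] + t[0]   (t[0] raises IndexError on empty t; t is never empty under Pre_)
def keydStep (t : List Char) : List Char :=
  PySem.List.slice t (some 1) (some 128) ++
    (match PySem.List.pyGet? t 0 with | some c => [c] | none => [])

def keyd (kenya : Int) : List Int :=
  -- kenya = bin(kenya)[2:]
  let kb := PySem.List.slice (PySem.Int.toBinChars0b kenya) (some 2) none
  -- state: (out so far, shift, t); out[i] is appended in order
  let res := (PySem.List.pyRange 0 8 1).foldl
    (fun (st : List (List Char) × Int × List Char) i =>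
      let t := (PySem.List.pyRange 0 (i * 25) 1).foldl (fun t _ => keydStep t) st.2.2
      (st.1 ++ [t], st.2.1 + 1, kb)) ([], 0, kb)
  pvChunks res.1.flatten

-- ===== PORT B =====
def keyd_alt (kenya : Int) : List Int :=
  let kb := PySem.List.slice (PySem.Int.toBinChars0b kenya) (some 2) none
  let base := PySem.List.slice kb none (some 128)
  let m := PySem.List.len base
  let parts := (PySem.List.pyRange 1 8 1).foldl
    (fun ps i =>
      let k := PySem.Int.mod (25 * i) m
      ps ++ [PySem.List.slice base (some k) none ++ PySem.List.slice base none (some k)]) [kb]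
  pvChunks parts.flatten

-- ===== PRECONDITION & SPEC =====
-- Pre_ excludes negative kenya: there bin(kenya)[2:] starts with 'b', and int(chunk, 2) raises ValueError in both A and B.
def Pre_keyd (kenya : Int) : Prop := 0 ≤ kenya
instance (kenya : Int) : Decidable (Pre_keyd kenya) := by unfold Pre_keyd; infer_instance
def pvWitness_keyd : Int := 77

def Spec_keyd (kenya : Int) (out : List Int) : Prop := out = keyd_alt kenya
instance (kenya : Int) (out : List Int) : Decidable (Spec_keyd kenya out) := by unfold Spec_keyd; infer_instance

-- ===== CLAIM (what is proved, stated in full; the proofs are below) =====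
def Claim_equal_keyd : Prop := ∀ (kenya : Int), Dom_keyd kenya → Pre_keyd kenya → Spec_keyd kenya (keyd kenya)

-- ===== LEMMAS AND PROOFS =====

lemma toDigitsCore_ne_nil (b f n : Nat) (ds : List Char) (h : ds ≠ []) :
    Nat.toDigitsCore b f n ds ≠ [] := by
  induction f generalizing n ds with
  | zero => simpa [Nat.toDigitsCore]
  | succ f ih =>
    simp only [Nat.toDigitsCore]
    split
    · simp
    · exact ih _ _ (by simp)

lemma toDigits_ne_nil (b n : Nat) : Nat.toDigits b n ≠ [] := by
  simp only [Nat.toDigits, Nat.toDigitsCore]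
  split
  · simp
  · exact toDigitsCore_ne_nil _ _ _ _ (by simp)

lemma keydStep_rot (t : List Char) (h1 : t ≠ []) (h2 : t.length ≤ 128) :
    keydStep t = t.rotate 1 := by
  obtain ⟨a, l, rfl⟩ := List.exists_cons_of_ne_nil h1
  rw [keydStep, PySem.List.slice_toNat _ (by norm_num) (by norm_num)]
  have h127 : l.length ≤ 127 := by simp at h2; omega
  simp [List.take_of_length_le h127, List.rotate_cons_succ]

lemma fold_keydStep (L : List Int) (t : List Char) (h1 : t ≠ []) (h2 : t.length ≤ 128) :
    L.foldl (fun t _ => keydStep t) t = t.rotate L.length := by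
  induction L generalizing t with
  | nil => simp
  | cons x L ih =>
    have hne : t.rotate 1 ≠ [] := by
      intro h; exact h1 (by simpa using congrArg List.length h)
    have hlen : (t.rotate 1).length ≤ 128 := by simpa using h2
    simp only [List.foldl_cons, keydStep_rot t h1 h2, ih _ hne hlen, List.rotate_rotate,
      List.length_cons]
    ring_nf

lemma slice_rot (s : List Char) (h1 : s ≠ []) (j : Int) (hj : 0 ≤ j) :
    PySem.List.slice s (some (PySem.Int.mod j (PySem.List.len s))) none ++
      PySem.List.slice s none (some (PySem.Int.mod j (PySem.List.len s))) = s.rotate j.toNat := by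
  have hjn : j = ((j.toNat : Nat) : Int) := by omega
  rw [hjn, PySem.List.len_eq, PySem.Int.mod_natCast,
    PySem.List.slice_from_natCast, PySem.List.slice_to_natCast]
  have hpos : 0 < s.length := List.length_pos_of_ne_nil h1
  have hle : j.toNat % s.length ≤ s.length := le_of_lt (Nat.mod_lt _ hpos)
  rw [← List.rotate_eq_drop_append_take hle, List.rotate_mod]
  congr 1

-- ===== VERDICT (by name: the statement is the Claim_ definition above) =====
theorem keyd_spec : Claim_equal_keyd := by
  intro kenya hdom hpre
  unfold Pre_keyd at hpre
  unfold Spec_keyd keyd keyd_alt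
  have hb : PySem.List.slice (PySem.Int.toBinChars0b kenya) (some 2) none
      = Nat.toDigits 2 kenya.toNat := by
    simp only [PySem.Int.toBinChars0b, if_neg (show ¬ kenya < 0 by omega)]
    rw [PySem.List.slice_from (α := Char) _ (a := 2) (by norm_num)]
    rfl
  have hne : Nat.toDigits 2 kenya.toNat ≠ [] := toDigits_ne_nil 2 kenya.toNat
  have hbd : kenya ≤ 2147483648 := by
    unfold Dom_keyd pvDomInt at hdom
    simp at hdom
    exact hdom.2
  have hlen : (Nat.toDigits 2 kenya.toNat).length ≤ 128 := by
    refine Nat.toDigits_length 2 kenya.toNat 128 (by norm_num) ?_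
    calc kenya.toNat ≤ 2147483648 := by omega
      _ < 2 ^ 128 := by norm_num
  rw [hb]
  set s := Nat.toDigits 2 kenya.toNat with hs
  have hbase : PySem.List.slice s none (some 128) = s := by
    rw [PySem.List.slice_to (α := Char) (b := 128) _ (by norm_num)]
    exact List.take_of_length_le (by simp; omega)
  have hrange8 : PySem.List.pyRange 0 8 1 = [0,1,2,3,4,5,6,7] := by decide
  have hrange17 : PySem.List.pyRange 1 8 1 = [1,2,3,4,5,6,7] := by decide
  have hfold : ∀ L : List Int, L.foldl (fun t _ => keydStep t) s = s.rotate L.length :=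
    fun L => fold_keydStep L s hne hlen
  simp only [hrange8, hrange17, hbase, List.foldl, hfold]
  rw [slice_rot s hne (25*1) (by norm_num), slice_rot s hne (25*2) (by norm_num),
    slice_rot s hne (25*3) (by norm_num), slice_rot s hne (25*4) (by norm_num),
    slice_rot s hne (25*5) (by norm_num), slice_rot s hne (25*6) (by norm_num),
    slice_rot s hne (25*7) (by norm_num)]
  norm_num [PySem.List.length_pyRange_one]
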